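-- pv_equiv track=rewrite | github.com/nachodcortes/Facultad | Fundamentos/Final 1.py | tiene_digitos_unicos
-- ===== SOURCE A (Python) =====
-- def busqueda(lista, numero):
--     i = 0
--     while i < len(lista) and lista[i] != numero:
--        i = i + 1
--     if i < len(lista):
--        return True
--     else:
--        return False
--
-- def tiene_digitos_unicos(numero):
--     digitos = []
--     while numero > 0:
--         digito = numero % 10
--         if busqueda(digitos, digito):
--             return False
--         digitos.append(digito)
--         numero = numero // 10
--     return True
-- ===== SOURCE B (Python) =====
-- def tiene_digitos_unicos(numero):
--     digitos = []
--     while numero > 0: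
--         digitos.append(numero % 10)
--         numero = numero // 10
--     return len(digitos) == len(set(digitos))
-- ===== Notes on version B (the rewrite author's own statement) =====
-- stated objective: simpler
-- what changed: B collects all digits in one plain extraction loop and decides uniqueness afterwards with a single length-vs-distinct-count comparison, removing A's per-digit linear search ('busqueda') and its early-return duplicate check.
import Mathlib
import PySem

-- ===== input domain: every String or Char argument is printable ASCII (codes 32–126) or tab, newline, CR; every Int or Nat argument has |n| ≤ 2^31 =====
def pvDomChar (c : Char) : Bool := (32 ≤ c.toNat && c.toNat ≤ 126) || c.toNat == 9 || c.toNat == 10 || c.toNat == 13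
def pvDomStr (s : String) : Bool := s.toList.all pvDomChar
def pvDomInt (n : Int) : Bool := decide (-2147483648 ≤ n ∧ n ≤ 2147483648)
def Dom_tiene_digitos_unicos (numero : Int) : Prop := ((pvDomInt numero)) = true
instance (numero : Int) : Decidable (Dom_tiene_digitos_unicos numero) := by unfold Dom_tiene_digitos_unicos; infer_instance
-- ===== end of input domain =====

-- B replaces A's per-digit linear search with early return by one digit-collection pass
-- followed by a single length-vs-distinct-count comparison (objective: simpler).

-- termination helper for the digit loops (numero // 10 shrinks while numero > 0)
theorem floordiv10_toNat_lt (n : Int) (h : 0 < n) :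
    (PySem.Int.floordiv n 10).toNat < n.toNat := by
  show ((n.fdiv 10).toNat < n.toNat)
  rw [Int.fdiv_eq_ediv]
  omega

-- ===== PORT A =====

-- while i < len(lista) and lista[i] != numero: i = i + 1  — returns the final i.
-- (lista[i] is only read while i < len(lista), so getD is exact here.)
def busquedaLoop (lista : List Int) (numero : Int) (i : Nat) : Nat :=
  if i < lista.length ∧ lista.getD i 0 ≠ numero then
    busquedaLoop lista numero (i + 1)
  else i
termination_by lista.length - i
decreasing_by omega

def busqueda (lista : List Int) (numero : Int) : Bool :=
  decide (busquedaLoop lista numero 0 < lista.length)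

def tduLoop (digitos : List Int) (numero : Int) : Bool :=
  if numero > 0 then
    let digito := PySem.Int.mod numero 10
    if busqueda digitos digito then false
    else tduLoop (digitos ++ [digito]) (PySem.Int.floordiv numero 10)
  else true
termination_by numero.toNat
decreasing_by exact floordiv10_toNat_lt numero (by omega)

def tiene_digitos_unicos (numero : Int) : Bool := tduLoop [] numero

-- ===== PORT B =====

def collectDigits (digitos : List Int) (numero : Int) : List Int :=
  if numero > 0 then
    collectDigits (digitos ++ [PySem.Int.mod numero 10]) (PySem.Int.floordiv numero 10)
  else digitos
termination_by numero.toNat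
decreasing_by exact floordiv10_toNat_lt numero (by omega)

def tiene_digitos_unicos_alt (numero : Int) : Bool :=
  let digitos := collectDigits [] numero
  decide (digitos.length = (PySem.Set.ofList digitos).length)

-- ===== PRECONDITION & SPEC =====
def Spec_tiene_digitos_unicos (numero : Int) (out : Bool) : Prop := out = tiene_digitos_unicos_alt numero
instance (numero : Int) (out : Bool) : Decidable (Spec_tiene_digitos_unicos numero out) := by unfold Spec_tiene_digitos_unicos; infer_instance

-- ===== CLAIM (what is proved, stated in full; the proofs are below) =====
def Claim_equal_tiene_digitos_unicos : Prop := ∀ (numero : Int), Dom_tiene_digitos_unicos numero → Spec_tiene_digitos_unicos numero (tiene_digitos_unicos numero)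

-- ===== LEMMAS AND PROOFS =====

theorem tduLoop_pos (digitos : List Int) (numero : Int) (h : numero > 0) :
    tduLoop digitos numero =
      (if busqueda digitos (PySem.Int.mod numero 10) then false
       else tduLoop (digitos ++ [PySem.Int.mod numero 10]) (PySem.Int.floordiv numero 10)) := by
  rw [tduLoop]; simp [h]

theorem tduLoop_nonpos (digitos : List Int) (numero : Int) (h : ¬ numero > 0) :
    tduLoop digitos numero = true := by
  rw [tduLoop]; simp [h]

theorem collectDigits_pos (digitos : List Int) (numero : Int) (h : numero > 0) :
    collectDigits digitos numero =
      collectDigits (digitos ++ [PySem.Int.mod numero 10]) (PySem.Int.floordiv numero 10) := by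
  rw [collectDigits]; simp [h]

theorem collectDigits_nonpos (digitos : List Int) (numero : Int) (h : ¬ numero > 0) :
    collectDigits digitos numero = digitos := by
  rw [collectDigits]; simp [h]

theorem busquedaLoop_lt_iff (lista : List Int) (numero : Int) :
    ∀ i, (busquedaLoop lista numero i < lista.length) ↔ numero ∈ lista.drop i := by
  intro i
  induction hk : lista.length - i using Nat.strong_induction_on generalizing i with
  | _ k ih =>
    rw [busquedaLoop]
    by_cases h : i < lista.length ∧ lista.getD i 0 ≠ numero
    · rw [if_pos h]
      obtain ⟨hi, hne⟩ := h
      have hg : lista.getD i 0 = lista[i] := List.getD_eq_getElem _ _ hi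
      rw [ih _ (by omega) (i + 1) rfl, List.drop_eq_getElem_cons hi, List.mem_cons]
      constructor
      · exact Or.inr
      · rintro (heq | hm)
        · exact absurd heq.symm (hg ▸ hne)
        · exact hm
    · rw [if_neg h]
      by_cases hi : i < lista.length
      · have hne : lista.getD i 0 = numero := by
          by_contra hc; exact h ⟨hi, hc⟩
        have hg : lista.getD i 0 = lista[i] := List.getD_eq_getElem _ _ hi
        constructor
        · intro _
          rw [List.drop_eq_getElem_cons hi]
          exact List.mem_cons.mpr (Or.inl (hg ▸ hne).symm)
        · intro _
          exact hi
      · have hle : lista.length ≤ i := by omega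
        rw [List.drop_eq_nil_of_le hle]
        simp
        omega

theorem busqueda_eq_mem (lista : List Int) (numero : Int) :
    busqueda lista numero = decide (numero ∈ lista) := by
  simp [busqueda, busquedaLoop_lt_iff lista numero 0]

theorem collectDigits_split : ∀ (k : Nat) (n : Int), n.toNat ≤ k →
    ∀ s : List Int, collectDigits s n = s ++ collectDigits [] n := by
  intro k
  induction k with
  | zero =>
    intro n hn s
    have h : ¬ n > 0 := by omega
    rw [collectDigits_nonpos _ _ h, collectDigits_nonpos _ _ h]
    simp
  | succ k ih =>
    intro n hn s
    by_cases hpos : n > 0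
    · have hlt : (PySem.Int.floordiv n 10).toNat ≤ k := by
        have := floordiv10_toNat_lt n (by omega)
        omega
      rw [collectDigits_pos _ _ hpos, collectDigits_pos [] _ hpos,
          ih _ hlt (s ++ [PySem.Int.mod n 10]), ih _ hlt ([] ++ [PySem.Int.mod n 10])]
      simp
    · rw [collectDigits_nonpos _ _ hpos, collectDigits_nonpos _ _ hpos]
      simp

theorem foldl_add_split : ∀ (xs s : List Int), ∃ t : List Int,
    xs.foldl PySem.Set.add s = s ++ t ∧ t.Sublist xs := by
  intro xs
  induction xs with
  | nil => intro s; exact ⟨[], by simp, List.Sublist.refl _⟩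
  | cons x xs ih =>
    intro s
    by_cases hx : x ∈ s
    · obtain ⟨t, ht, hsub⟩ := ih s
      refine ⟨t, ?_, hsub.cons x⟩
      simpa [List.foldl_cons, PySem.Set.add, PySem.Set.contains, hx] using ht
    · obtain ⟨t, ht, hsub⟩ := ih (s ++ [x])
      refine ⟨x :: t, ?_, hsub.cons₂ x⟩
      simpa [List.foldl_cons, PySem.Set.add, PySem.Set.contains, hx] using ht

theorem foldl_add_of_nodup : ∀ (xs s : List Int), (s ++ xs).Nodup →
    xs.foldl PySem.Set.add s = s ++ xs := by
  intro xs
  induction xs with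
  | nil => intro s _; simp
  | cons x xs ih =>
    intro s hnd
    have hnd' : (x :: (xs ++ s)).Nodup := by
      have := (List.perm_append_comm (l₁ := s) (l₂ := x :: xs)).nodup hnd
      simpa using this
    have hx : x ∉ s :=
      fun hm => (List.nodup_cons.mp hnd').1 (List.mem_append.mpr (Or.inr hm))
    have hcont : PySem.Set.contains s x = false := by
      simpa [PySem.Set.contains] using hx
    have hrec := ih (s ++ [x]) (by simpa using hnd)
    rw [List.foldl_cons]
    have hadd : PySem.Set.add s x = s ++ [x] := by
      simp [PySem.Set.add, PySem.Set.contains, hx]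
    rw [hadd, hrec]
    simp

theorem ofList_length_iff (xs : List Int) :
    (xs.length = (PySem.Set.ofList xs).length) ↔ xs.Nodup := by
  constructor
  · intro h
    obtain ⟨t, ht, hsub⟩ := foldl_add_split xs []
    have hofl : PySem.Set.ofList xs = t := by
      rw [PySem.Set.ofList_eq_foldl, ht]; simp
    have hl : t.length = xs.length := by
      rw [hofl] at h; omega
    have heq : t = xs := hsub.eq_of_length hl
    have hnd := PySem.Set.nodup_ofList (α := Int) xs
    rw [hofl, heq] at hnd
    exact hnd
  · intro h
    rw [PySem.Set.ofList_eq_foldl, foldl_add_of_nodup xs [] (by simpa using h)]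
    simp

theorem tduLoop_eq_nodup : ∀ (k : Nat) (n : Int), n.toNat ≤ k →
    ∀ ds : List Int, ds.Nodup →
      tduLoop ds n = decide (collectDigits ds n).Nodup := by
  intro k
  induction k with
  | zero =>
    intro n hn ds hds
    have h : ¬ n > 0 := by omega
    rw [tduLoop_nonpos _ _ h, collectDigits_nonpos _ _ h]
    simp [hds]
  | succ k ih =>
    intro n hn ds hds
    by_cases hpos : n > 0
    · have hlt : (PySem.Int.floordiv n 10).toNat ≤ k := by
        have := floordiv10_toNat_lt n (by omega)
        omega
      rw [tduLoop_pos _ _ hpos, collectDigits_pos _ _ hpos, busqueda_eq_mem]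
      set d := PySem.Int.mod n 10 with hd
      by_cases hmem : d ∈ ds
      · simp only [hmem, decide_true, if_true]
        rw [collectDigits_split _ _ hlt (ds ++ [d])]
        have hnotnd : ¬ ((ds ++ [d]) ++ collectDigits [] (PySem.Int.floordiv n 10)).Nodup := by
          intro hnd
          have h2 := hnd.sublist (List.sublist_append_left _ _)
          have h3 : (d :: ds).Nodup := by
            have := (List.perm_append_comm (l₁ := ds) (l₂ := [d])).nodup h2
            simpa using this
          exact (List.nodup_cons.mp h3).1 hmem
        exact (decide_eq_false hnotnd).symm
      · simp only [hmem, decide_false, if_false]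
        have hnd2 : (ds ++ [d]).Nodup := by
          have h3 : (d :: ds).Nodup := List.nodup_cons.mpr ⟨hmem, hds⟩
          exact (List.perm_append_comm (l₁ := [d]) (l₂ := ds)).nodup h3
        exact ih _ hlt (ds ++ [d]) hnd2
    · rw [tduLoop_nonpos _ _ hpos, collectDigits_nonpos _ _ hpos]
      simp [hds]

-- ===== VERDICT (by name: the statement is the Claim_ definition above) =====
theorem tiene_digitos_unicos_spec : Claim_equal_tiene_digitos_unicos := by
  intro n _
  unfold Spec_tiene_digitos_unicos tiene_digitos_unicos tiene_digitos_unicos_alt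
  rw [tduLoop_eq_nodup n.toNat n le_rfl [] List.nodup_nil]
  simp [ofList_length_iff]
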